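-- pv_equiv track=rewrite | github.com/mentecatoDev/python | cadenas/02c.py | cambiar_x2
-- ===== SOURCE A (Python) =====
-- def cambiar_x2(cad, rmax):
--     if rmax == 0:
--         return cad
--     salida = ""
--     rep = 0
--     digitos = "0123456789"
--     for i in range(len(cad)):
--         if cad[i] in digitos:
--             salida += "X"
--             rep += 1
--             if rep == rmax:
--                 salida += cad[i+1:]
--                 break
--         else:
--             salida += cad[i]
--     return salida
-- ===== SOURCE B (Python) =====
-- def cambiar_x2(cad, rmax):
--     if rmax == 0:
--         return cad
--     positions = [i for i, c in enumerate(cad) if c in "0123456789"]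
--     limit = rmax if rmax > 0 else len(cad)
--     targets = set(positions[:limit])
--     return "".join("X" if i in targets else c for i, c in enumerate(cad))
-- ===== Notes on version B (the rewrite author's own statement) =====
-- stated objective: alternative
-- what changed: A's single incremental concat-with-counter-and-break loop is replaced by two passes: first collect the indices of all digits, pick the first rmax of them (all when rmax is negative) into a set, then rebuild the string with a join over enumerate emitting 'X' at target indices.
import Mathlib
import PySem

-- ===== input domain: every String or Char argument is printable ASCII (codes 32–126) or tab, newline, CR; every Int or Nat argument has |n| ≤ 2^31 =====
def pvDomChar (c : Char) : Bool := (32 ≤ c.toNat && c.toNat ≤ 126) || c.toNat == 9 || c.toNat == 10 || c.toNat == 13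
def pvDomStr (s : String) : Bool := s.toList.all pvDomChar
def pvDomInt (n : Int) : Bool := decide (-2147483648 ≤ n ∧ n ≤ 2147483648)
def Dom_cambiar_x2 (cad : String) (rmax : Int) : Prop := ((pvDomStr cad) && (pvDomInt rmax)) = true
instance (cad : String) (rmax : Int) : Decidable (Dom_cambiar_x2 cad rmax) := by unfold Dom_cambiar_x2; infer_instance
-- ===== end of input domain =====

-- B replaces A's incremental concat-with-break loop by two passes: collect digit indices, then rebuild via a join over enumerate; objective: alternative decomposition, same cost.


-- ===== PORT A =====
-- the for-loop over range(len(cad)) with accumulator `salida`, counter `rep` and the break (salida += cad[i+1:])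
def cambiarAuxA (rmax : Int) : List Char → List Char → Int → List Char
  | [], salida, _ => salida
  | c :: t, salida, rep =>
    if "0123456789".toList.contains c then
      let salida := salida ++ ['X']
      let rep := rep + 1
      if rep == rmax then salida ++ t
      else cambiarAuxA rmax t salida rep
    else cambiarAuxA rmax t (salida ++ [c]) rep

def cambiar_x2 (cad : String) (rmax : Int) : String :=
  if rmax == 0 then cad
  else String.mk (cambiarAuxA rmax cad.toList [] 0)

-- ===== PORT B =====
def cambiar_x2_alt (cad : String) (rmax : Int) : String :=
  if rmax == 0 then cad
  else
    let cs := cad.toList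
    let positions := ((PySem.List.enumerate cs 0).filter
        (fun p => "0123456789".toList.contains p.2)).map (·.1)
    let limit : Int := if rmax > 0 then rmax else (cs.length : Int)
    let targets : PySem.Set Int := PySem.Set.ofList (PySem.List.slice positions none (some limit))
    String.mk ((PySem.List.enumerate cs 0).map (fun p => if p.1 ∈ targets then 'X' else p.2))

-- ===== PRECONDITION & SPEC =====
def Spec_cambiar_x2 (cad : String) (rmax : Int) (out : String) : Prop := out = cambiar_x2_alt cad rmax
instance (cad : String) (rmax : Int) (out : String) : Decidable (Spec_cambiar_x2 cad rmax out) := by unfold Spec_cambiar_x2; infer_instance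

-- ===== CLAIM (what is proved, stated in full; the proofs are below) =====
def Claim_equal_cambiar_x2 : Prop := ∀ (cad : String) (rmax : Int), Dom_cambiar_x2 cad rmax → Spec_cambiar_x2 cad rmax (cambiar_x2 cad rmax)

-- ===== LEMMAS AND PROOFS =====

-- budget-style characterisation of A's loop: b = rmax - rep
def gA : Int → List Char → List Char
  | _, [] => []
  | b, c :: t =>
    if "0123456789".toList.contains c then
      if b = 1 then 'X' :: t else 'X' :: gA (b - 1) t
    else c :: gA b t

-- budget-style characterisation of B's reconstruction: replace the first n digits
def hB : Nat → List Char → List Char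
  | _, [] => []
  | n, c :: t =>
    if "0123456789".toList.contains c then
      if n = 0 then c :: hB 0 t else 'X' :: hB (n - 1) t
    else c :: hB n t

theorem gA_digit1 (c : Char) (t : List Char) (hd : "0123456789".toList.contains c = true) :
    gA 1 (c :: t) = 'X' :: t := by
  simp only [gA]; rw [if_pos hd]; simp

theorem gA_digit (b : Int) (c : Char) (t : List Char)
    (hd : "0123456789".toList.contains c = true) (hb : b ≠ 1) :
    gA b (c :: t) = 'X' :: gA (b - 1) t := by
  simp only [gA]; rw [if_pos hd, if_neg hb]

theorem gA_nondigit (b : Int) (c : Char) (t : List Char)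
    (hd : "0123456789".toList.contains c = false) :
    gA b (c :: t) = c :: gA b t := by
  simp only [gA]; rw [if_neg (by rw [hd]; simp)]

theorem hB_digit0 (c : Char) (t : List Char) (hd : "0123456789".toList.contains c = true) :
    hB 0 (c :: t) = c :: hB 0 t := by
  simp only [hB]; rw [if_pos hd]; simp

theorem hB_digit (n : Nat) (c : Char) (t : List Char)
    (hd : "0123456789".toList.contains c = true) :
    hB (n + 1) (c :: t) = 'X' :: hB n t := by
  simp only [hB]; rw [if_pos hd, if_neg (Nat.succ_ne_zero n)]; simp

theorem hB_nondigit (n : Nat) (c : Char) (t : List Char)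
    (hd : "0123456789".toList.contains c = false) :
    hB n (c :: t) = c :: hB n t := by
  simp only [hB]; rw [if_neg (by rw [hd]; simp)]

theorem auxA_eq_gA (rmax : Int) (t : List Char) :
    ∀ (salida : List Char) (rep : Int), cambiarAuxA rmax t salida rep = salida ++ gA (rmax - rep) t := by
  induction t with
  | nil => intro salida rep; simp [cambiarAuxA, gA]
  | cons c t ih =>
    intro salida rep
    simp only [cambiarAuxA]
    by_cases hd : "0123456789".toList.contains c = true
    · rw [if_pos hd]
      by_cases hb : rmax - rep = 1
      · have he : (rep + 1 == rmax) = true := by rw [beq_iff_eq]; omega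
        rw [if_pos he, hb, gA_digit1 c t hd]
        simp
      · have he : (rep + 1 == rmax) = false := by rw [beq_eq_false_iff_ne]; omega
        rw [if_neg (by simp [he]), ih, gA_digit (rmax - rep) c t hd hb]
        have : rmax - (rep + 1) = rmax - rep - 1 := by omega
        simp [this]
    · rw [if_neg hd, ih, gA_nondigit (rmax - rep) c t (by simpa using hd)]
      simp

theorem hB_zero (t : List Char) : hB 0 t = t := by
  induction t with
  | nil => rfl
  | cons c t ih =>
    by_cases hd : "0123456789".toList.contains c = true
    · rw [hB_digit0 c t hd, ih]
    · rw [hB_nondigit 0 c t (by simpa using hd), ih]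

theorem gA_pos_eq_hB (t : List Char) : ∀ (b : Int), 1 ≤ b → gA b t = hB b.toNat t := by
  induction t with
  | nil => intro b _; rfl
  | cons c t ih =>
    intro b hb
    by_cases hd : "0123456789".toList.contains c = true
    · by_cases h1 : b = 1
      · subst h1
        rw [gA_digit1 c t hd, show (1 : Int).toNat = 0 + 1 from rfl, hB_digit 0 c t hd, hB_zero]
      · obtain ⟨m, hm⟩ : ∃ m : Nat, b.toNat = m + 1 := ⟨b.toNat - 1, by omega⟩
        have hm' : (b - 1).toNat = m := by omega
        rw [gA_digit b c t hd h1, hm, hB_digit m c t hd, ih (b - 1) (by omega), hm']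
    · rw [gA_nondigit b c t (by simpa using hd), hB_nondigit b.toNat c t (by simpa using hd),
        ih b hb]

theorem gA_neg_eq_hB (t : List Char) :
    ∀ (b : Int) (n : Nat), b < 0 → t.length ≤ n → gA b t = hB n t := by
  induction t with
  | nil => intro b n _ _; rfl
  | cons c t ih =>
    intro b n hb hn
    obtain ⟨m, hm⟩ : ∃ m : Nat, n = m + 1 := ⟨n - 1, by simp at hn; omega⟩
    subst hm
    by_cases hd : "0123456789".toList.contains c = true
    · rw [gA_digit b c t hd (by omega), hB_digit m c t hd,
        ih (b - 1) m (by omega) (by simp at hn; omega)]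
    · rw [gA_nondigit b c t (by simpa using hd), hB_nondigit (m + 1) c t (by simpa using hd),
        ih b (m + 1) hb (by simp at hn; omega)]

-- digit positions of t when enumeration starts at s
def posFrom (s : Int) (t : List Char) : List Int :=
  ((PySem.List.enumerate t s).filter (fun p => "0123456789".toList.contains p.2)).map (·.1)

theorem mem_posFrom_ge (s : Int) (t : List Char) : ∀ i ∈ posFrom s t, s ≤ i := by
  intro i hi
  simp only [posFrom, List.mem_map, List.mem_filter] at hi
  obtain ⟨p, ⟨hp, _⟩, rfl⟩ := hi
  obtain ⟨k, hk, rfl⟩ := (PySem.List.mem_enumerate_iff t s p).1 hp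
  simp

theorem posFrom_cons (s : Int) (c : Char) (t : List Char) :
    posFrom s (c :: t) =
      if "0123456789".toList.contains c then s :: posFrom (s + 1) t else posFrom (s + 1) t := by
  simp only [posFrom, PySem.List.enumerate_cons, List.filter_cons]
  by_cases hd : "0123456789".toList.contains c = true
  · rw [if_pos (by simpa using hd), if_pos hd, List.map_cons]
  · rw [if_neg (by simpa using hd), if_neg hd]

theorem map_enum_eq_hB (t : List Char) :
    ∀ (s : Int) (k : Nat),
      (PySem.List.enumerate t s).map
        (fun p => if p.1 ∈ PySem.Set.ofList ((posFrom s t).take k) then 'X' else p.2) = hB k t := by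
  induction t with
  | nil => intro s k; simp [PySem.List.enumerate_nil, hB]
  | cons c t ih =>
    intro s k
    have hge : ∀ i ∈ posFrom (s + 1) t, s < i := by
      intro i hi; have := mem_posFrom_ge (s + 1) t i hi; omega
    have hnot : ∀ k', s ∉ PySem.Set.ofList ((posFrom (s + 1) t).take k') := by
      intro k' hs
      rw [PySem.Set.mem_ofList] at hs
      exact absurd (hge s (List.mem_of_mem_take hs)) (lt_irrefl s)
    rw [PySem.List.enumerate_cons, List.map_cons, posFrom_cons]
    by_cases hd : "0123456789".toList.contains c = true
    · rw [if_pos hd]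
      match k with
      | 0 =>
        rw [List.take_zero]
        rw [if_neg (by simp : ¬ ((s, c).1 ∈ PySem.Set.ofList ([] : List Int)))]
        have hcg : ∀ p ∈ PySem.List.enumerate t (s + 1),
            (if p.1 ∈ PySem.Set.ofList (([] : List Int)) then 'X' else p.2)
              = (if p.1 ∈ PySem.Set.ofList ((posFrom (s + 1) t).take 0) then 'X' else p.2) := by
          simp
        rw [List.map_congr_left hcg, ih (s + 1) 0, hB_digit0 c t hd]
      | m + 1 =>
        rw [List.take_succ_cons]
        rw [if_pos (by simp [PySem.Set.mem_ofList] :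
          (s, c).1 ∈ PySem.Set.ofList (s :: (posFrom (s + 1) t).take m))]
        have hcg : ∀ p ∈ PySem.List.enumerate t (s + 1),
            (if p.1 ∈ PySem.Set.ofList (s :: (posFrom (s + 1) t).take m) then 'X' else p.2)
              = (if p.1 ∈ PySem.Set.ofList ((posFrom (s + 1) t).take m) then 'X' else p.2) := by
          intro p hp
          obtain ⟨j, hj, rfl⟩ := (PySem.List.mem_enumerate_iff t (s + 1) p).1 hp
          have hne : (s + 1 + (j : Int)) ≠ s := by omega
          by_cases hmem : (s + 1 + (j : Int)) ∈ (posFrom (s + 1) t).take m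
          · simp [PySem.Set.mem_ofList, hmem]
          · simp [PySem.Set.mem_ofList, hmem, hne]
        rw [List.map_congr_left hcg, ih (s + 1) m, hB_digit m c t hd]
    · rw [if_neg hd, if_neg (by simpa using hnot k)]
      rw [ih (s + 1) k, hB_nondigit k c t (by simpa using hd)]

-- ===== VERDICT (by name: the statement is the Claim_ definition above) =====
theorem cambiar_x2_spec : Claim_equal_cambiar_x2 := by
  intro cad rmax _
  unfold Spec_cambiar_x2
  by_cases hz : rmax = 0
  · simp [cambiar_x2, cambiar_x2_alt, hz]
  · have h0 : ¬ ((rmax == 0) = true) := by simp [hz]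
    have hlim : 0 ≤ (if rmax > 0 then rmax else (cad.toList.length : Int)) := by
      split <;> omega
    have halt : cambiar_x2_alt cad rmax
        = String.mk ((PySem.List.enumerate cad.toList 0).map
            (fun p => if p.1 ∈ PySem.Set.ofList (PySem.List.slice (posFrom 0 cad.toList) none
              (some (if rmax > 0 then rmax else (cad.toList.length : Int)))) then 'X' else p.2)) := by
      rw [cambiar_x2_alt, if_neg h0]
      rfl
    rw [halt, PySem.List.slice_to _ hlim, map_enum_eq_hB cad.toList 0 _]
    rw [cambiar_x2, if_neg h0, auxA_eq_gA rmax cad.toList [] 0, List.nil_append,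
      show rmax - 0 = rmax by omega]
    by_cases hpos : rmax > 0
    · rw [if_pos hpos, gA_pos_eq_hB cad.toList rmax (by omega)]
    · have hneg : rmax < 0 := by omega
      rw [if_neg hpos, gA_neg_eq_hB cad.toList rmax cad.toList.length hneg (le_refl _),
        Int.toNat_natCast]
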